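-- pv_equiv track=rewrite | github.com/haseatsu114514-dot/shisha-game | tools/update_assets_index.py | build_duplicate_report
-- ===== SOURCE A (Python) =====
-- from collections import Counter, defaultdict
-- from typing import Any
--
-- def build_duplicate_report(entries: list[dict[str, Any]]) -> dict[str, list[str]]:
--     buckets: dict[str, list[str]] = defaultdict(list)
--     for entry in entries:
--         buckets[entry["filename"]].append(entry["path"])
--     duplicates = {
--         filename: sorted(paths)
--         for filename, paths in buckets.items()
--         if len(paths) > 1
--     }
--     return dict(sorted(duplicates.items()))
-- ===== SOURCE B (Python) =====
-- def build_duplicate_report(entries):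
--     filenames = sorted({e["filename"] for e in entries})
--     report = {}
--     for f in filenames:
--         paths = sorted(e["path"] for e in entries if e["filename"] == f)
--         if len(paths) > 1:
--             report[f] = paths
--     return report
-- ===== Notes on version B (the rewrite author's own statement) =====
-- stated objective: alternative
-- what changed: Replaces the defaultdict bucketing pass plus two dict-comprehension/sort passes with a sorted distinct-filename list and one per-filename scan collecting and sorting that filename's paths directly.
import Mathlib
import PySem

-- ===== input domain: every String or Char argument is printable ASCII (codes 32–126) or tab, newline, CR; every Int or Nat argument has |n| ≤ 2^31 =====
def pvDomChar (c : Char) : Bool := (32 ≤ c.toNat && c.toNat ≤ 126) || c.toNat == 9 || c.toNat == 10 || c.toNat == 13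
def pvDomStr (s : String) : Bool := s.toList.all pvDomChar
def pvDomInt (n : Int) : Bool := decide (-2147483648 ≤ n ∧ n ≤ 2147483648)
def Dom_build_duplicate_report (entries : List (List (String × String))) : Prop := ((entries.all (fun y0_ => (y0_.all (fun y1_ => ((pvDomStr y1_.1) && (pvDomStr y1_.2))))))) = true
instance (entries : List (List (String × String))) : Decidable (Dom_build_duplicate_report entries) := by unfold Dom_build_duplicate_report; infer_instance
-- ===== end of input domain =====

-- B replaces A's defaultdict bucketing with sorted distinct filenames and a per-filename scan (alternative decomposition, same results).

-- entry[k]: first-match association-list lookup; Pre_ guarantees the key is present, so the "" default is never reached on admitted inputs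
def pyEntryGet (e : List (String × String)) (k : String) : String :=
  ((e.find? (fun kv => kv.1 == k)).map (·.2)).getD ""

-- ===== PORT A =====
def build_duplicate_report (entries : List (List (String × String))) : List (String × List String) :=
  let buckets : PySem.Dict String (List String) :=
    entries.foldl
      (fun d e => d.modify (pyEntryGet e "filename") [] (fun ps => ps ++ [pyEntryGet e "path"]))
      PySem.Dict.empty
  let duplicates : List (String × List String) :=
    (buckets.items.filter (fun fp => decide (1 < fp.2.length))).map
      (fun fp => (fp.1, PySem.List.sorted fp.2 id))
  -- sorted(duplicates.items()): Python tuple comparison = lexicographic on (str, list[str])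
  PySem.List.sorted duplicates (fun fp => toLex fp)

-- ===== PORT B =====
def build_duplicate_report_alt (entries : List (List (String × String))) : List (String × List String) :=
  let filenames : List String :=
    PySem.List.sorted (PySem.Set.ofList (entries.map (fun e => pyEntryGet e "filename"))) id
  filenames.foldl
    (fun report f =>
      let paths :=
        PySem.List.sorted
          ((entries.filter (fun e => pyEntryGet e "filename" == f)).map (fun e => pyEntryGet e "path")) id
      if decide (1 < paths.length) then report ++ [(f, paths)] else report)
    []

-- ===== PRECONDITION & SPEC =====
-- Pre_ excludes exactly the inputs where Python raises KeyError: an entry without a "filename" or "path" key.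
def Pre_build_duplicate_report (entries : List (List (String × String))) : Prop :=
  ∀ e ∈ entries,
    (e.find? (fun kv => kv.1 == "filename")).isSome ∧ (e.find? (fun kv => kv.1 == "path")).isSome
instance (entries : List (List (String × String))) : Decidable (Pre_build_duplicate_report entries) := by
  unfold Pre_build_duplicate_report; infer_instance

def pvWitness_build_duplicate_report : (List (List (String × String))) :=
  [[("filename", "a"), ("path", "p1")], [("filename", "a"), ("path", "p0")]]

def Spec_build_duplicate_report (entries : List (List (String × String))) (out : List (String × List String)) : Prop := out = build_duplicate_report_alt entries
instance (entries : List (List (String × String))) (out : List (String × List String)) : Decidable (Spec_build_duplicate_report entries out) := by unfold Spec_build_duplicate_report; infer_instance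

-- ===== CLAIM (what is proved, stated in full; the proofs are below) =====
def Claim_equal_build_duplicate_report : Prop := ∀ (entries : List (List (String × String))), Dom_build_duplicate_report entries → Pre_build_duplicate_report entries → Spec_build_duplicate_report entries (build_duplicate_report entries)

-- ===== LEMMAS AND PROOFS =====

-- abbreviations used only by the proofs
def pvFn (e : List (String × String)) : String := pyEntryGet e "filename"
def pvPa (e : List (String × String)) : String := pyEntryGet e "path"
def pvPaths (entries : List (List (String × String))) (f : String) : List String :=
  ((entries.filter (fun e => pvFn e == f)).map pvPa)
def pvG (entries : List (List (String × String))) (f : String) : String × List String :=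
  (f, PySem.List.sorted (pvPaths entries f) id)
def pvP (entries : List (List (String × String))) (f : String) : Bool :=
  decide (1 < (pvPaths entries f).length)

-- A's bucket dictionary, read off via the PySem.Dict loop lemmas
lemma pvBuckets_getD (entries : List (List (String × String))) (f : String) :
    (entries.foldl
      (fun d e => d.modify (pyEntryGet e "filename") [] (fun ps => ps ++ [pyEntryGet e "path"]))
      (PySem.Dict.empty : PySem.Dict String (List String))).getD f [] = pvPaths entries f := by
  have h := PySem.Dict.getD_foldl_modify_append
      (entries.map (fun e => (pvFn e, pvPa e))) (PySem.Dict.empty : PySem.Dict String (List String)) f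
  rw [List.foldl_map] at h
  simpa [pvPaths, List.filter_map, Function.comp, pvFn, pvPa] using h

lemma pvBuckets_keys (entries : List (List (String × String))) :
    (entries.foldl
      (fun d e => d.modify (pyEntryGet e "filename") [] (fun ps => ps ++ [pyEntryGet e "path"]))
      (PySem.Dict.empty : PySem.Dict String (List String))).keys
    = PySem.Set.ofList (entries.map pvFn) := by
  have h := PySem.Dict.keys_foldl_modify_key entries (fun e => pyEntryGet e "filename") []
      (fun _ e => fun ps => ps ++ [pyEntryGet e "path"])
      (PySem.Dict.empty : PySem.Dict String (List String))
  simpa [PySem.Set.update_nil_left, pvFn, PySem.Set.ofList] using h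

lemma pvBuckets_keys_nodup (entries : List (List (String × String))) :
    (entries.foldl
      (fun d e => d.modify (pyEntryGet e "filename") [] (fun ps => ps ++ [pyEntryGet e "path"]))
      (PySem.Dict.empty : PySem.Dict String (List String))).keys.Nodup := by
  exact PySem.Dict.nodup_keys_foldl_modify_key entries (fun e => pyEntryGet e "filename") []
      (fun _ e => fun ps => ps ++ [pyEntryGet e "path"]) _ (by decide)

-- A in normal form: sort (by Python tuple order) of the mapped filter of the distinct filenames
lemma pvA_eq (entries : List (List (String × String))) :
    build_duplicate_report entries
    = PySem.List.sorted
        (((PySem.Set.ofList (entries.map pvFn) : List String).filter (pvP entries)).map (pvG entries))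
        (fun fp => toLex fp) := by
  simp only [build_duplicate_report]
  rw [PySem.Dict.items_eq_map_keys _ (pvBuckets_keys_nodup entries) []]
  rw [pvBuckets_keys, List.filter_map]
  congr 1
  rw [List.map_map]
  congr 1
  · funext f; simp [pvG, pvBuckets_getD]
  · congr 1; funext f; simp [Function.comp, pvP, pvBuckets_getD]

-- B in normal form: mapped filter of the sorted distinct filenames
lemma pvB_eq (entries : List (List (String × String))) :
    build_duplicate_report_alt entries
    = ((PySem.List.sorted (PySem.Set.ofList (entries.map pvFn) : List String) id).filter
        (pvP entries)).map (pvG entries) := by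
  unfold build_duplicate_report_alt
  have hpaths : ∀ f, ((entries.filter (fun e => pyEntryGet e "filename" == f)).map
      (fun e => pyEntryGet e "path")) = pvPaths entries f := by
    intro f; simp [pvPaths, pvFn, pvPa]
  have : (fun (report : List (String × List String)) (f : String) =>
      let paths := PySem.List.sorted ((entries.filter (fun e => pyEntryGet e "filename" == f)).map
        (fun e => pyEntryGet e "path")) id
      if decide (1 < paths.length) then report ++ [(f, paths)] else report)
      = fun report f => if pvP entries f then report ++ [pvG entries f] else report := by
    funext report f
    simp only [hpaths, pvP, pvG, PySem.List.length_sorted]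
  rw [this, PySem.List.foldl_append_if (pvP entries) (pvG entries)]
  rfl

-- strict key-ordering of B's output list (distinct sorted filenames ⇒ strictly increasing tuples)
lemma pvB_pairwise (entries : List (List (String × String))) :
    List.Pairwise (fun a b => (fun fp => toLex fp) a < (fun fp => toLex fp) b)
      (((PySem.List.sorted (PySem.Set.ofList (entries.map pvFn) : List String) id).filter
        (pvP entries)).map (pvG entries)) := by
  apply List.Pairwise.map (R := fun (a b : String) => a < b)
  · intro a b hab
    simp only [pvG, Prod.Lex.toLex_lt_toLex]
    exact Or.inl hab
  · apply List.Pairwise.filter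
    have hle := PySem.List.sorted_pairwise (PySem.Set.ofList (entries.map pvFn) : List String) id
    have hnd : (PySem.List.sorted (PySem.Set.ofList (entries.map pvFn) : List String) id).Nodup :=
      (PySem.List.sorted_perm _ id false).nodup_iff.mpr (PySem.Set.nodup_ofList _)
    exact (hle.and hnd).imp (fun h => lt_of_le_of_ne h.1 h.2)

-- ===== VERDICT (by name: the statement is the Claim_ definition above) =====
theorem build_duplicate_report_spec : Claim_equal_build_duplicate_report := by
  intro entries _ _
  unfold Spec_build_duplicate_report
  rw [pvA_eq, pvB_eq]
  exact PySem.List.sorted_eq_of_perm_of_pairwise_lt _ _ _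
    (((PySem.List.sorted_perm _ id false).filter _).map _) (pvB_pairwise entries)
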